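-- pv_equiv track=rewrite | github.com/jasonhavenD/DJH-RE_CRF_EN | src/process_result_of_predict.py | convertEntBIO2one
-- ===== SOURCE A (Python) =====
-- def convertEntBIO2one(sent):
-- 	index_tags = [[i, t[2:]] for i, w, t in sent if t.startswith('B-')]
-- 	tokens = []
-- 	for idx, token, tag in sent:
-- 		if tag.startswith('I-'):  # Inside NE
-- 			tokens[-1] += ' ' + token
-- 		elif tag.startswith('B-'):  # Adjacent NE
-- 			tokens.append(token)
--
-- 	return [(i_t[0], w, i_t[1]) for i_t, w in zip(index_tags, tokens)]
-- ===== SOURCE B (Python) =====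
-- def convertEntBIO2one(sent):
--     result = []
--     for i, token, tag in sent:
--         if tag.startswith('B-'):
--             result.append((i, token, tag[2:]))
--         elif tag.startswith('I-'):
--             prev = result[-1]
--             result[-1] = (prev[0], prev[1] + ' ' + token, prev[2])
--     return result
-- ===== Notes on version B (the rewrite author's own statement) =====
-- stated objective: simpler
-- what changed: B fuses A's three passes (a B- comprehension, a token-merging loop, and a final zip) into one pass that builds the result tuples directly, updating the last tuple in place on an I- tag.
import Mathlib
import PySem

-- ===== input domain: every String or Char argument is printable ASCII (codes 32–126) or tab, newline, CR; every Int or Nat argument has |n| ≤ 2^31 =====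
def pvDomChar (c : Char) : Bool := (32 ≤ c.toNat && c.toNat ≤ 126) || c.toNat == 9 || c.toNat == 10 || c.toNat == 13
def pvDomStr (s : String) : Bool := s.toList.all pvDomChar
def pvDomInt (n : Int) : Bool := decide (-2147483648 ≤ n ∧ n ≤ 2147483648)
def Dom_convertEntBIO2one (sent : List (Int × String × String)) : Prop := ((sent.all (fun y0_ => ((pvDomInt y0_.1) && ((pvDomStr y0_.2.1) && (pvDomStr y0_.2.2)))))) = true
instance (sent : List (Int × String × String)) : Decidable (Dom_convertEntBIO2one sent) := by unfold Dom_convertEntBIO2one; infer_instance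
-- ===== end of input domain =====

-- B fuses A's three passes (B- comprehension, token loop, zip) into one direct-building pass; objective: simpler.


-- shared helper: Python's `l[-1] = f(l[-1])` / `l[-1] += …` on a NONEMPTY list.
-- On [] Python raises IndexError (excluded by Pre_); here [] is left unchanged.
def pvModLast {α : Type} (u : α → α) : List α → List α
  | [] => []
  | [a] => [u a]
  | a :: b :: l => a :: pvModLast u (b :: l)

-- ===== PORT A =====
def convertEntBIO2one (sent : List (Int × String × String)) : List (Int × String × String) :=
  let index_tags : List (Int × String) :=
    sent.filterMap (fun e =>
      if PySem.Str.startswith e.2.2 "B-" then some (e.1, PySem.Str.slice e.2.2 (some 2) none)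
      else none)
  let tokens : List String :=
    sent.foldl (fun toks e =>
      if PySem.Str.startswith e.2.2 "I-" then pvModLast (fun w => w ++ " " ++ e.2.1) toks
      else if PySem.Str.startswith e.2.2 "B-" then toks ++ [e.2.1]
      else toks) []
  (index_tags.zip tokens).map (fun p => (p.1.1, p.2, p.1.2))

-- ===== PORT B =====
def convertEntBIO2one_alt (sent : List (Int × String × String)) : List (Int × String × String) :=
  sent.foldl (fun res e =>
    if PySem.Str.startswith e.2.2 "B-" then
      res ++ [(e.1, e.2.1, PySem.Str.slice e.2.2 (some 2) none)]
    else if PySem.Str.startswith e.2.2 "I-" then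
      pvModLast (fun r => (r.1, r.2.1 ++ " " ++ e.2.1, r.2.2)) res
    else res) []

-- ===== PRECONDITION & SPEC =====
-- Pre_ excludes exactly the inputs where an 'I-' tag occurs before the first 'B-' tag:
-- there Python A raises IndexError (tokens[-1] on an empty list), and Python B raises too.
def Pre_convertEntBIO2one (sent : List (Int × String × String)) : Prop :=
  ((sent.takeWhile (fun e => !(PySem.Str.startswith e.2.2 "B-"))).all
    (fun e => !(PySem.Str.startswith e.2.2 "I-"))) = true
instance (sent : List (Int × String × String)) : Decidable (Pre_convertEntBIO2one sent) := by
  unfold Pre_convertEntBIO2one; infer_instance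

def pvWitness_convertEntBIO2one : (List (Int × String × String)) :=
  [(0, "John", "B-PER"), (1, "Smith", "I-PER"), (2, "runs", "O"), (3, "Paris", "B-LOC")]

def Spec_convertEntBIO2one (sent : List (Int × String × String)) (out : List (Int × String × String)) : Prop := out = convertEntBIO2one_alt sent
instance (sent : List (Int × String × String)) (out : List (Int × String × String)) : Decidable (Spec_convertEntBIO2one sent out) := by unfold Spec_convertEntBIO2one; infer_instance

-- ===== CLAIM (what is proved, stated in full; the proofs are below) =====
def Claim_equal_convertEntBIO2one : Prop := ∀ (sent : List (Int × String × String)), Dom_convertEntBIO2one sent → Pre_convertEntBIO2one sent → Spec_convertEntBIO2one sent (convertEntBIO2one sent)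

-- ===== LEMMAS AND PROOFS =====

-- the pairing A's final zip performs: ((i, tag'), token) ↦ (i, token, tag')
def pvF : (Int × String) → String → (Int × String × String) := fun p w => (p.1, w, p.2)

theorem pvModLast_length {α : Type} (u : α → α) (l : List α) :
    (pvModLast u l).length = l.length := by
  induction l with
  | nil => rfl
  | cons a tl ih =>
    cases tl with
    | nil => rfl
    | cons b l2 => simpa [pvModLast] using ih

theorem pv_not_I_of_B (t : String) (h : PySem.Str.startswith t "B-" = true) :
    PySem.Str.startswith t "I-" = false := by
  by_contra hc
  rw [Bool.not_eq_false] at hc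
  rw [PySem.Str.startswith_eq, PySem.Chars.startswith_iff] at h hc
  obtain ⟨u, hu⟩ := h
  obtain ⟨v, hv⟩ := hc
  have hB : "B-".toList = ['B', '-'] := rfl
  have hI : "I-".toList = ['I', '-'] := rfl
  rw [hB] at hu; rw [hI] at hv
  have := hu.trans hv.symm
  simp at this

theorem pv_zip_modLast (tok : String) : ∀ (toks : List String) (itags : List (Int × String)),
    itags.length = toks.length →
    List.zipWith pvF itags (pvModLast (fun w => w ++ " " ++ tok) toks)
      = pvModLast (fun r => (r.1, r.2.1 ++ " " ++ tok, r.2.2)) (List.zipWith pvF itags toks) := by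
  intro toks
  induction toks with
  | nil => intro itags h; simp [pvModLast]
  | cons a tl ih =>
    intro itags h
    cases itags with
    | nil => simp at h
    | cons p ps =>
      cases tl with
      | nil =>
        cases ps with
        | nil => simp [pvModLast, pvF]
        | cons q qs => simp at h
      | cons b l2 =>
        cases ps with
        | nil => simp at h
        | cons q qs =>
          have h' : (q :: qs).length = (b :: l2).length := by simp at h ⊢; omega
          simp only [pvModLast, List.zipWith]
          rw [ih (q :: qs) h']
          simp

theorem pv_key : ∀ (rest : List (Int × String × String)) (itags : List (Int × String)) (toks : List String),
    itags.length = toks.length →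
    List.zipWith pvF
      (itags ++ rest.filterMap (fun e =>
        if PySem.Str.startswith e.2.2 "B-" then some (e.1, PySem.Str.slice e.2.2 (some 2) none) else none))
      (rest.foldl (fun toks e =>
        if PySem.Str.startswith e.2.2 "I-" then pvModLast (fun w => w ++ " " ++ e.2.1) toks
        else if PySem.Str.startswith e.2.2 "B-" then toks ++ [e.2.1]
        else toks) toks)
    = rest.foldl (fun res e =>
        if PySem.Str.startswith e.2.2 "B-" then res ++ [(e.1, e.2.1, PySem.Str.slice e.2.2 (some 2) none)]
        else if PySem.Str.startswith e.2.2 "I-" then pvModLast (fun r => (r.1, r.2.1 ++ " " ++ e.2.1, r.2.2)) res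
        else res) (List.zipWith pvF itags toks) := by
  intro rest
  induction rest with
  | nil => intro itags toks h; simp
  | cons e rest ih =>
    intro itags toks h
    by_cases hB : PySem.Str.startswith e.2.2 "B-" = true
    · have hI := pv_not_I_of_B _ hB
      simp only [List.filterMap_cons, List.foldl_cons, hB, hI, if_true, if_false,
        Bool.false_eq_true]
      rw [List.append_cons,
        ih (itags ++ [(e.1, PySem.Str.slice e.2.2 (some 2) none)]) (toks ++ [e.2.1]) (by simp [h]),
        List.zipWith_append h]
      simp [pvF]
    · by_cases hI : PySem.Str.startswith e.2.2 "I-" = true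
      · simp only [List.filterMap_cons, List.foldl_cons, hB, hI, if_true, if_false,
          Bool.false_eq_true]
        rw [ih itags (pvModLast (fun w => w ++ " " ++ e.2.1) toks) (by rw [pvModLast_length]; exact h),
          pv_zip_modLast _ _ _ h]
      · simp only [List.filterMap_cons, List.foldl_cons, hB, hI, if_false,
          Bool.false_eq_true]
        exact ih itags toks h

-- ===== VERDICT (by name: the statement is the Claim_ definition above) =====
theorem convertEntBIO2one_spec : Claim_equal_convertEntBIO2one := by
  intro sent _ _
  unfold Spec_convertEntBIO2one convertEntBIO2one convertEntBIO2one_alt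
  have := pv_key sent [] [] rfl
  simp only [List.nil_append, List.zipWith_nil_left] at this
  rw [← this]
  simp only [List.zip, List.map_zipWith]
  rfl
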